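-- pv_equiv track=rewrite | github.com/pakkio/lsl_simulator | unused_files/mock_nexus_server.py | parse_npc_profile
-- ===== SOURCE A (Python) =====
-- def parse_npc_profile(profile_text):
--     """
--     Parses a notecard-style NPC profile into a structured dictionary.
--     The profile is expected to be a series of key-value pairs separated by colons.
--
--     Args:
--         profile_text (str): The raw text from the NPC's profile notecard.
--
--     Returns:
--         dict: A dictionary containing the parsed NPC attributes.
--     """
--     npc_data = {}
--     current_key = None
--     current_value = []
--
--     lines = profile_text.strip().split('\n')
--
--     for line in lines:
--         line = line.strip()
--         if ':' in line and not line.startswith(' ') and not line.startswith('-'):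
--             # Save previous key-value
--             if current_key:
--                 npc_data[current_key] = '\n'.join(current_value).strip()
--
--             # Start new key-value
--             parts = line.split(':', 1)
--             current_key = parts[0].strip()
--             current_value = [parts[1].strip()] if len(parts) > 1 else []
--         else:
--             # Continue previous value
--             if current_key:
--                 current_value.append(line)
--
--     # Save last key-value
--     if current_key:
--         npc_data[current_key] = '\n'.join(current_value).strip()
--
--     return npc_data
-- ===== SOURCE B (Python) =====
-- def parse_npc_profile(profile_text):
--     """Parse a colon-delimited NPC profile into a dict (block-based rewrite)."""
--     lines = [ln.strip() for ln in profile_text.strip().split('\n')]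
--
--     def is_header(ln):
--         return ':' in ln and not ln.startswith('-')
--
--     # One walk over the stripped lines, cutting them into (header, continuation
--     # lines) blocks; lines before the first header belong to no block.
--     blocks = []
--     i = 0
--     n = len(lines)
--     while i < n:
--         if is_header(lines[i]):
--             j = i + 1
--             while j < n and not is_header(lines[j]):
--                 j += 1
--             blocks.append((lines[i], lines[i + 1:j]))
--             i = j
--         else:
--             i += 1
--
--     npc_data = {}
--     for header, conts in blocks:
--         key, _, after = header.partition(':')
--         key = key.strip()
--         if key:
--             npc_data[key] = '\n'.join([after.strip()] + conts).strip()
--     return npc_data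
-- ===== Notes on version B (the rewrite author's own statement) =====
-- stated objective: alternative
-- what changed: B first cuts the stripped lines into (header, continuation-lines) blocks in one walk and then folds the blocks into the dict with str.partition, instead of A's single stateful loop carrying current_key/current_value with an end-of-loop flush.
import Mathlib
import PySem

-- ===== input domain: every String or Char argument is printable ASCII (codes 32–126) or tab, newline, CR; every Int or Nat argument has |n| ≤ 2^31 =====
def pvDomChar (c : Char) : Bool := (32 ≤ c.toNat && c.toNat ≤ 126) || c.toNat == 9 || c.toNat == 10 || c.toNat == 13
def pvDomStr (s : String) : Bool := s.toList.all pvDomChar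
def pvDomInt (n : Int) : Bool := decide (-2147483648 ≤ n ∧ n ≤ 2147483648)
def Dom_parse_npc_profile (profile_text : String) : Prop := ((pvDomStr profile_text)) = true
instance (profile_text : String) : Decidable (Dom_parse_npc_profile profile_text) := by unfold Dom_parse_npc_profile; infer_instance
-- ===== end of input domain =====

-- B re-implements A by cutting the stripped lines into (header, continuation) blocks in
-- one walk and then folding the blocks into the dict (objective: alternative decomposition).

-- ===== PORT A =====

-- "if current_key:" — current_key is truthy (not None and not the empty string)
def pvTruthy (ck : Option (List Char)) : Bool :=
  match ck with
  | none => false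
  | some k => !k.isEmpty

-- "npc_data[current_key] = '\n'.join(current_value).strip()" guarded by "if current_key:"
def pvSave (d : PySem.Dict (List Char) (List Char)) (ck : Option (List Char))
    (cv : List (List Char)) : PySem.Dict (List Char) (List Char) :=
  if pvTruthy ck then d.insert (ck.getD []) (PySem.Chars.strip (PySem.Chars.join ['\n'] cv)) else d

-- the "for line in lines:" loop, carried state (npc_data, current_key, current_value)
def pvLoopA : List (List Char) →
    PySem.Dict (List Char) (List Char) × Option (List Char) × List (List Char) →
    PySem.Dict (List Char) (List Char) × Option (List Char) × List (List Char)
  | [], st => st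
  | l0 :: ls, (d, ck, cv) =>
    let line := PySem.Chars.strip l0
    if PySem.Chars.isIn [':'] line && !PySem.Chars.startswith line [' ']
        && !PySem.Chars.startswith line ['-'] then
      let d' := pvSave d ck cv
      let parts := PySem.Chars.splitOnMax line [':'] 1
      let ck' := PySem.Chars.strip (parts.headD [])
      let cv' := if parts.length > 1 then [PySem.Chars.strip (parts[1]?.getD [])] else []
      pvLoopA ls (d', some ck', cv')
    else
      if pvTruthy ck then pvLoopA ls (d, ck, cv ++ [line]) else pvLoopA ls (d, ck, cv)

def parse_npc_profile (profile_text : String) : List (String × String) :=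
  let lines := PySem.Chars.splitOn (PySem.Chars.strip profile_text.toList) ['\n']
  let st := pvLoopA lines (PySem.Dict.empty, none, [])
  (pvSave st.1 st.2.1 st.2.2).items.map (fun p => (String.ofList p.1, String.ofList p.2))

-- ===== PORT B =====

def pvIsHeader (l : List Char) : Bool :=
  PySem.Chars.isIn [':'] l && !PySem.Chars.startswith l ['-']

-- the block-cutting walk: a header starts a block, following non-headers are its continuation
def pvToBlocks : List (List Char) → List (List Char × List (List Char))
  | [] => []
  | l :: ls =>
    if pvIsHeader l then
      (l, ls.takeWhile (fun x => !pvIsHeader x)) :: pvToBlocks (ls.dropWhile (fun x => !pvIsHeader x))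
    else pvToBlocks ls
termination_by ls => ls.length
decreasing_by
  · simp only [List.length_cons]
    exact Nat.lt_succ_of_le (List.length_dropWhile_le _ ls)
  · simp

-- hand port of "header.partition(':')" (before, after); exact for this single-character separator
def pvPartitionColon (s : List Char) : List Char × List Char :=
  if ':' ∈ s then (s.takeWhile (· ≠ ':'), (s.dropWhile (· ≠ ':')).tail) else (s, [])

-- body of B's "for header, conts in blocks:" loop
def pvBlockInsert (d : PySem.Dict (List Char) (List Char))
    (b : List Char × List (List Char)) : PySem.Dict (List Char) (List Char) :=
  let p := pvPartitionColon b.1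
  let key := PySem.Chars.strip p.1
  if key.isEmpty then d
  else d.insert key (PySem.Chars.strip (PySem.Chars.join ['\n'] (PySem.Chars.strip p.2 :: b.2)))

def parse_npc_profile_alt (profile_text : String) : List (String × String) :=
  let lines := (PySem.Chars.splitOn (PySem.Chars.strip profile_text.toList) ['\n']).map PySem.Chars.strip
  ((pvToBlocks lines).foldl pvBlockInsert PySem.Dict.empty).items.map
    (fun p => (String.ofList p.1, String.ofList p.2))

-- ===== PRECONDITION & SPEC =====
def Spec_parse_npc_profile (profile_text : String) (out : List (String × String)) : Prop := out = parse_npc_profile_alt profile_text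
instance (profile_text : String) (out : List (String × String)) : Decidable (Spec_parse_npc_profile profile_text out) := by unfold Spec_parse_npc_profile; infer_instance

-- ===== CLAIM (what is proved, stated in full; the proofs are below) =====
def Claim_equal_parse_npc_profile : Prop := ∀ (profile_text : String), Dom_parse_npc_profile profile_text → Spec_parse_npc_profile profile_text (parse_npc_profile profile_text)

-- ===== LEMMAS AND PROOFS =====

-- a stripped line never starts with a space
lemma pvDropWhile_head_false (p : Char → Bool) (l : List Char) (c : Char) (t : List Char)
    (h : l.dropWhile p = c :: t) : p c = false := by
  have hne : l.dropWhile p ≠ [] := by simp [h]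
  have h2 := List.head_dropWhile_not (p := p) (l := l) hne
  have h3 : (l.dropWhile p).head hne = c := by simp [h]
  rw [h3] at h2
  simpa using h2

lemma pvStrip_startswith_space (l : List Char) :
    PySem.Chars.startswith (PySem.Chars.strip l) [' '] = false := by
  by_contra hcon
  rw [Bool.not_eq_false, PySem.Chars.startswith_iff] at hcon
  obtain ⟨t, ht⟩ := hcon
  have hpre : PySem.Chars.strip l <+: PySem.Chars.lstrip l := by
    have := List.dropWhile_suffix (l := (PySem.Chars.lstrip l).reverse) (p := PySem.Chars.isspace)
    rw [← List.reverse_prefix] at this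
    simpa [PySem.Chars.strip, PySem.Chars.rstrip] using this
  rw [← ht] at hpre
  obtain ⟨t', ht'⟩ := hpre
  have : PySem.Chars.isspace ' ' = false := by
    refine pvDropWhile_head_false PySem.Chars.isspace l ' ' (t ++ t') ?_
    simpa [PySem.Chars.lstrip] using ht'.symm
  exact absurd this (by decide)

-- 'c in l' as a Bool, for a single character
lemma pvIsIn_singleton (c : Char) (l : List Char) :
    PySem.Chars.isIn [c] l = decide (c ∈ l) := by
  rcases h : PySem.Chars.isIn [c] l with _ | _
  · rw [PySem.Chars.isIn_eq_false_iff] at h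
    simp only [List.singleton_infix_iff] at h
    simp [h]
  · rw [PySem.Chars.isIn_iff_infix] at h
    simp only [List.singleton_infix_iff] at h
    simp [h]

-- line.split(':', 1) when ':' occurs in line
lemma pvGo_m0 (fuel : Nat) (l cur : List Char) (acc : List (List Char)) :
    PySem.Chars.splitOnMax.go [':'] fuel 0 l cur acc = ((cur.reverse ++ l) :: acc).reverse := by
  cases fuel <;> cases l <;> simp [PySem.Chars.splitOnMax.go]

lemma pvGo_m1 (l : List Char) : ∀ (fuel : Nat), l.length < fuel → ':' ∈ l →
    ∀ (cur : List Char) (acc : List (List Char)),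
    PySem.Chars.splitOnMax.go [':'] fuel 1 l cur acc =
      acc.reverse ++ [cur.reverse ++ l.takeWhile (· ≠ ':'), (l.dropWhile (· ≠ ':')).tail] := by
  induction l with
  | nil => intro fuel _ hmem; simp at hmem
  | cons c rest ih =>
    intro fuel hlt hmem cur acc
    obtain ⟨f, rfl⟩ : ∃ f, fuel = f + 1 := ⟨fuel - 1, by omega⟩
    by_cases hc : c = ':'
    · subst hc
      rw [PySem.Chars.splitOnMax.go]
      simp only [List.isPrefixOf, beq_self_eq_true, Bool.true_and, if_true]
      simp [pvGo_m0, List.takeWhile, List.dropWhile]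
    · rw [PySem.Chars.splitOnMax.go]
      have hpre : List.isPrefixOf [':'] (c :: rest) = false := by
        simp [List.isPrefixOf]
        exact fun hh => absurd hh.symm hc
      have hmem' : ':' ∈ rest := by
        rcases List.mem_cons.mp hmem with h1 | h1
        · exact absurd h1.symm hc
        · exact h1
      simp only [hpre, if_neg (by omega : ¬(1 : Nat) = 0)]
      rw [ih f (by simpa using Nat.lt_of_succ_lt_succ hlt) hmem' (c :: cur) acc]
      simp [hc]

lemma pvSplitOnMax_colon (l : List Char) (h : ':' ∈ l) :
    PySem.Chars.splitOnMax l [':'] 1 =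
      [l.takeWhile (· ≠ ':'), (l.dropWhile (· ≠ ':')).tail] := by
  rw [PySem.Chars.splitOnMax]
  rw [if_neg (by omega)]
  have := pvGo_m1 l (l.length + 1) (by omega) h [] []
  simpa using this

-- leading non-header lines start no block
lemma pvToBlocks_dropWhile (ls : List (List Char)) :
    pvToBlocks ls = pvToBlocks (ls.dropWhile (fun x => !pvIsHeader x)) := by
  induction ls with
  | nil => rfl
  | cons l ls ih =>
    by_cases h : pvIsHeader l
    · simp [h]
    · rw [pvToBlocks]
      simp [h, ih]

-- A's header test on a stripped line is B's is_header
lemma pvCond_eq (l0 : List Char) :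
    (PySem.Chars.isIn [':'] (PySem.Chars.strip l0)
      && !PySem.Chars.startswith (PySem.Chars.strip l0) [' ']
      && !PySem.Chars.startswith (PySem.Chars.strip l0) ['-'])
      = pvIsHeader (PySem.Chars.strip l0) := by
  simp [pvIsHeader, pvStrip_startswith_space l0]

-- one header step of A's loop
lemma pvLoopA_cons_header (l0 : List Char) (ls : List (List Char))
    (d : PySem.Dict (List Char) (List Char)) (ck : Option (List Char)) (cv : List (List Char))
    (hh : pvIsHeader (PySem.Chars.strip l0) = true) :
    pvLoopA (l0 :: ls) (d, ck, cv) =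
      pvLoopA ls (pvSave d ck cv,
        some (PySem.Chars.strip ((PySem.Chars.strip l0).takeWhile (· ≠ ':'))),
        [PySem.Chars.strip (((PySem.Chars.strip l0).dropWhile (· ≠ ':')).tail)]) := by
  have hcolon : ':' ∈ PySem.Chars.strip l0 := by
    have := hh
    simp [pvIsHeader, pvIsIn_singleton] at this
    exact this.1
  simp only [pvLoopA, pvCond_eq l0, hh, if_true, pvSplitOnMax_colon _ hcolon]
  simp

-- one continuation step of A's loop
lemma pvLoopA_cons_cont (l0 : List Char) (ls : List (List Char))
    (d : PySem.Dict (List Char) (List Char)) (ck : Option (List Char)) (cv : List (List Char))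
    (hh : pvIsHeader (PySem.Chars.strip l0) = false) :
    pvLoopA (l0 :: ls) (d, ck, cv) =
      if pvTruthy ck then pvLoopA ls (d, ck, cv ++ [PySem.Chars.strip l0])
      else pvLoopA ls (d, ck, cv) := by
  simp only [pvLoopA, pvCond_eq l0, hh, Bool.false_eq_true, if_false]

-- the final save applied to the loop's end state (proof-only abbreviation)
def pvFinish (st : PySem.Dict (List Char) (List Char) × Option (List Char) × List (List Char)) :
    PySem.Dict (List Char) (List Char) := pvSave st.1 st.2.1 st.2.2

-- the main correspondence between A's loop and B's blocks
lemma pvMain (ls : List (List Char)) :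
    ∀ (d : PySem.Dict (List Char) (List Char)) (cv : List (List Char)),
      (∀ ck, pvTruthy ck = false →
        pvFinish (pvLoopA ls (d, ck, cv)) =
          (pvToBlocks (ls.map PySem.Chars.strip)).foldl pvBlockInsert d)
      ∧ (∀ k : List Char, k.isEmpty = false →
        pvFinish (pvLoopA ls (d, some k, cv)) =
          (pvToBlocks ((ls.map PySem.Chars.strip).dropWhile (fun x => !pvIsHeader x))).foldl
            pvBlockInsert
            (d.insert k (PySem.Chars.strip (PySem.Chars.join ['\n']
              (cv ++ (ls.map PySem.Chars.strip).takeWhile (fun x => !pvIsHeader x)))))) := by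
  induction ls with
  | nil =>
    intro d cv
    refine ⟨fun ck hck => ?_, fun k hk => ?_⟩
    · simp [pvFinish, pvLoopA, pvSave, hck, pvToBlocks]
    · simp [pvFinish, pvLoopA, pvSave, pvTruthy, hk, pvToBlocks]
  | cons l0 ls ih =>
    intro d cv
    by_cases hh : pvIsHeader (PySem.Chars.strip l0) = true
    · -- header line: both the falsy and the truthy statement reduce to the same continuation
      have key : ∀ (d' : PySem.Dict (List Char) (List Char)),
          pvFinish
            (pvLoopA ls (d',
              some (PySem.Chars.strip ((PySem.Chars.strip l0).takeWhile (· ≠ ':'))),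
              [PySem.Chars.strip (((PySem.Chars.strip l0).dropWhile (· ≠ ':')).tail)])) =
          (pvToBlocks ((PySem.Chars.strip l0) :: ls.map PySem.Chars.strip)).foldl pvBlockInsert d' := by
        intro d'
        have hcolon : ':' ∈ PySem.Chars.strip l0 := by
          have := hh
          simp [pvIsHeader, pvIsIn_singleton] at this
          exact this.1
        rw [pvToBlocks]
        simp only [hh, if_true, List.foldl_cons]
        have hpb : pvBlockInsert d' (PySem.Chars.strip l0,
            (ls.map PySem.Chars.strip).takeWhile (fun x => !pvIsHeader x)) =
            if (PySem.Chars.strip ((PySem.Chars.strip l0).takeWhile (· ≠ ':'))).isEmpty then d'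
            else d'.insert (PySem.Chars.strip ((PySem.Chars.strip l0).takeWhile (· ≠ ':')))
              (PySem.Chars.strip (PySem.Chars.join ['\n']
                (PySem.Chars.strip (((PySem.Chars.strip l0).dropWhile (· ≠ ':')).tail) ::
                  (ls.map PySem.Chars.strip).takeWhile (fun x => !pvIsHeader x)))) := by
          simp [pvBlockInsert, pvPartitionColon, hcolon]
        by_cases hk' : (PySem.Chars.strip ((PySem.Chars.strip l0).takeWhile (· ≠ ':'))).isEmpty
        · rw [(ih d' _).1 _ (by simp only [pvTruthy]; simp at hk' ⊢; exact hk')]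
          rw [hpb, if_pos hk', pvToBlocks_dropWhile]
        · rw [(ih d' _).2 _ (by simpa using hk')]
          rw [hpb, if_neg hk']
          simp
      refine ⟨fun ck hck => ?_, fun k hk => ?_⟩
      · rw [pvLoopA_cons_header l0 ls d ck cv hh, key]
        simp only [List.map_cons]
        congr 1
        simp [pvSave, hck]
      · rw [pvLoopA_cons_header l0 ls d (some k) cv hh, key]
        simp only [List.map_cons, List.dropWhile_cons, List.takeWhile_cons, hh,
          Bool.not_true, Bool.false_eq_true, if_false]
        congr 1
        simp [pvSave, pvTruthy, hk]
    · -- continuation line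
      rw [Bool.not_eq_true] at hh
      refine ⟨fun ck hck => ?_, fun k hk => ?_⟩
      · rw [pvLoopA_cons_cont l0 ls d ck cv hh, if_neg (by simp [hck])]
        rw [(ih d cv).1 ck hck]
        simp only [List.map_cons]
        rw [pvToBlocks]
        simp [hh]
      · rw [pvLoopA_cons_cont l0 ls d (some k) cv hh,
          if_pos (by simp [pvTruthy]; simpa using hk)]
        rw [(ih d (cv ++ [PySem.Chars.strip l0])).2 k hk]
        simp only [List.map_cons, List.dropWhile_cons, List.takeWhile_cons, hh,
          Bool.not_false, if_true]
        simp

-- ===== VERDICT (by name: the statement is the Claim_ definition above) =====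
theorem parse_npc_profile_spec : Claim_equal_parse_npc_profile := by
  intro t _
  show _ = _
  unfold parse_npc_profile parse_npc_profile_alt
  have h := (pvMain (PySem.Chars.splitOn (PySem.Chars.strip t.toList) ['\n'])
      PySem.Dict.empty []).1 none rfl
  simp only [pvFinish] at h
  simp only []
  rw [h]
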